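-- pv_equiv track=rewrite | github.com/yiying-chen7/bio-relation-demo | demo/src/eval/metrics.py | _normalize_predicate
-- ===== SOURCE A (Python) =====
-- def _normalize_predicate(predicate: str) -> str:
--     """标准化谓词，处理近义词"""
--     predicate_map = {
--         "produces": ["produces", "generates", "creates", "synthesizes"],
--         "metabolizes": ["metabolizes", "processes", "breaks down"],
--         "affects": ["affects", "influences", "impacts", "modulates"],
--         "associates_with": ["associates with", "correlates with", "relates to"],
--         "degrades": ["degrades", "decomposes", "breaks down"],
--         "converts": ["converts", "transforms", "changes"],
--         "utilizes": ["utilizes", "uses", "consumes"]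
--     }
--
--     for standard, synonyms in predicate_map.items():
--         if predicate in synonyms:
--             return standard
--
--     return predicate
-- ===== SOURCE B (Python) =====
-- # Flat, precomputed synonym -> canonical table; "breaks down" maps to
-- # "metabolizes" because that entry comes first in the original map.
-- _CANONICAL = {
--     "produces": "produces",
--     "generates": "produces",
--     "creates": "produces",
--     "synthesizes": "produces",
--     "metabolizes": "metabolizes",
--     "processes": "metabolizes",
--     "breaks down": "metabolizes",
--     "affects": "affects",
--     "influences": "affects",
--     "impacts": "affects",
--     "modulates": "affects",
--     "associates with": "associates_with",
--     "correlates with": "associates_with",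
--     "relates to": "associates_with",
--     "degrades": "degrades",
--     "decomposes": "degrades",
--     "converts": "converts",
--     "transforms": "converts",
--     "changes": "converts",
--     "utilizes": "utilizes",
--     "uses": "utilizes",
--     "consumes": "utilizes",
-- }
--
-- def _normalize_predicate(predicate: str) -> str:
--     """标准化谓词，处理近义词"""
--     return _CANONICAL.get(predicate, predicate)
-- ===== Notes on version B (the rewrite author's own statement) =====
-- stated objective: idiomatic
-- what changed: Replaces the per-call loop over canonical predicates with list-membership tests by a single flat literal synonym-to-canonical dict ('breaks down' written as metabolizes to preserve first-match order); the function body is one dict.get with no loop or nested lists.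
import Mathlib
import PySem

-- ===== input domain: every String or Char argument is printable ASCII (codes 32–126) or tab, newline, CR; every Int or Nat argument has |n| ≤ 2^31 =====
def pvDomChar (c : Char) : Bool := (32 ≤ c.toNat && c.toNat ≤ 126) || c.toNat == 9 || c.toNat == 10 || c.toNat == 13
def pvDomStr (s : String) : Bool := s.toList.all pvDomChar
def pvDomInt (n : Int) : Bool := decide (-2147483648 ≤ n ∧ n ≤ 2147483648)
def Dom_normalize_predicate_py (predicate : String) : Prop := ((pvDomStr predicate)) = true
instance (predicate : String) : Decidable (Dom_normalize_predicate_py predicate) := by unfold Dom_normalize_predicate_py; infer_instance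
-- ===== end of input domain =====

-- B replaces A's per-call scan over canonical/synonym lists with a flat literal synonym→canonical dict and a single get (idiomatic, no loop at lookup time).

-- ===== PORT A =====
def pvPredicateMap : List (String × List String) := [
  ("produces", ["produces", "generates", "creates", "synthesizes"]),
  ("metabolizes", ["metabolizes", "processes", "breaks down"]),
  ("affects", ["affects", "influences", "impacts", "modulates"]),
  ("associates_with", ["associates with", "correlates with", "relates to"]),
  ("degrades", ["degrades", "decomposes", "breaks down"]),
  ("converts", ["converts", "transforms", "changes"]),
  ("utilizes", ["utilizes", "uses", "consumes"])]

-- the 'for standard, synonyms in …: if predicate in synonyms: return standard' loop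
def pvFindStd (predicate : String) : List (String × List String) → String
  | [] => predicate
  | (standard, synonyms) :: rest =>
      if synonyms.contains predicate then standard else pvFindStd predicate rest

def normalize_predicate_py (predicate : String) : String :=
  pvFindStd predicate pvPredicateMap

-- ===== PORT B =====
-- the module-level literal dict _CANONICAL of Source B
def pvCanonical : PySem.Dict String String := PySem.Dict.mk [
  ("produces", "produces"),
  ("generates", "produces"),
  ("creates", "produces"),
  ("synthesizes", "produces"),
  ("metabolizes", "metabolizes"),
  ("processes", "metabolizes"),
  ("breaks down", "metabolizes"),
  ("affects", "affects"),
  ("influences", "affects"),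
  ("impacts", "affects"),
  ("modulates", "affects"),
  ("associates with", "associates_with"),
  ("correlates with", "associates_with"),
  ("relates to", "associates_with"),
  ("degrades", "degrades"),
  ("decomposes", "degrades"),
  ("converts", "converts"),
  ("transforms", "converts"),
  ("changes", "converts"),
  ("utilizes", "utilizes"),
  ("uses", "utilizes"),
  ("consumes", "utilizes")]

def normalize_predicate_py_alt (predicate : String) : String :=
  pvCanonical.getD predicate predicate

-- ===== PRECONDITION & SPEC =====
def Spec_normalize_predicate_py (predicate : String) (out : String) : Prop := out = normalize_predicate_py_alt predicate
instance (predicate : String) (out : String) : Decidable (Spec_normalize_predicate_py predicate out) := by unfold Spec_normalize_predicate_py; infer_instance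

-- ===== CLAIM (what is proved, stated in full; the proofs are below) =====
def Claim_equal_normalize_predicate_py : Prop := ∀ (predicate : String), Dom_normalize_predicate_py predicate → Spec_normalize_predicate_py predicate (normalize_predicate_py predicate)

-- ===== LEMMAS AND PROOFS =====
theorem pv_eq (predicate : String) :
    normalize_predicate_py predicate = normalize_predicate_py_alt predicate := by
  by_cases h0 : predicate = "produces"
  · subst h0; decide
  by_cases h1 : predicate = "generates"
  · subst h1; decide
  by_cases h2 : predicate = "creates"
  · subst h2; decide
  by_cases h3 : predicate = "synthesizes"
  · subst h3; decide
  by_cases h4 : predicate = "metabolizes"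
  · subst h4; decide
  by_cases h5 : predicate = "processes"
  · subst h5; decide
  by_cases h6 : predicate = "breaks down"
  · subst h6; decide
  by_cases h7 : predicate = "affects"
  · subst h7; decide
  by_cases h8 : predicate = "influences"
  · subst h8; decide
  by_cases h9 : predicate = "impacts"
  · subst h9; decide
  by_cases h10 : predicate = "modulates"
  · subst h10; decide
  by_cases h11 : predicate = "associates with"
  · subst h11; decide
  by_cases h12 : predicate = "correlates with"
  · subst h12; decide
  by_cases h13 : predicate = "relates to"
  · subst h13; decide
  by_cases h14 : predicate = "degrades"
  · subst h14; decide
  by_cases h15 : predicate = "decomposes"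
  · subst h15; decide
  by_cases h16 : predicate = "converts"
  · subst h16; decide
  by_cases h17 : predicate = "transforms"
  · subst h17; decide
  by_cases h18 : predicate = "changes"
  · subst h18; decide
  by_cases h19 : predicate = "utilizes"
  · subst h19; decide
  by_cases h20 : predicate = "uses"
  · subst h20; decide
  by_cases h21 : predicate = "consumes"
  · subst h21; decide
  -- predicate matches no synonym: both sides return it unchanged
  have e0 : (predicate == "produces") = false := beq_eq_false_iff_ne.mpr h0
  have f0 : ("produces" == predicate) = false := beq_eq_false_iff_ne.mpr (Ne.symm h0)
  have e1 : (predicate == "generates") = false := beq_eq_false_iff_ne.mpr h1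
  have f1 : ("generates" == predicate) = false := beq_eq_false_iff_ne.mpr (Ne.symm h1)
  have e2 : (predicate == "creates") = false := beq_eq_false_iff_ne.mpr h2
  have f2 : ("creates" == predicate) = false := beq_eq_false_iff_ne.mpr (Ne.symm h2)
  have e3 : (predicate == "synthesizes") = false := beq_eq_false_iff_ne.mpr h3
  have f3 : ("synthesizes" == predicate) = false := beq_eq_false_iff_ne.mpr (Ne.symm h3)
  have e4 : (predicate == "metabolizes") = false := beq_eq_false_iff_ne.mpr h4
  have f4 : ("metabolizes" == predicate) = false := beq_eq_false_iff_ne.mpr (Ne.symm h4)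
  have e5 : (predicate == "processes") = false := beq_eq_false_iff_ne.mpr h5
  have f5 : ("processes" == predicate) = false := beq_eq_false_iff_ne.mpr (Ne.symm h5)
  have e6 : (predicate == "breaks down") = false := beq_eq_false_iff_ne.mpr h6
  have f6 : ("breaks down" == predicate) = false := beq_eq_false_iff_ne.mpr (Ne.symm h6)
  have e7 : (predicate == "affects") = false := beq_eq_false_iff_ne.mpr h7
  have f7 : ("affects" == predicate) = false := beq_eq_false_iff_ne.mpr (Ne.symm h7)
  have e8 : (predicate == "influences") = false := beq_eq_false_iff_ne.mpr h8
  have f8 : ("influences" == predicate) = false := beq_eq_false_iff_ne.mpr (Ne.symm h8)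
  have e9 : (predicate == "impacts") = false := beq_eq_false_iff_ne.mpr h9
  have f9 : ("impacts" == predicate) = false := beq_eq_false_iff_ne.mpr (Ne.symm h9)
  have e10 : (predicate == "modulates") = false := beq_eq_false_iff_ne.mpr h10
  have f10 : ("modulates" == predicate) = false := beq_eq_false_iff_ne.mpr (Ne.symm h10)
  have e11 : (predicate == "associates with") = false := beq_eq_false_iff_ne.mpr h11
  have f11 : ("associates with" == predicate) = false := beq_eq_false_iff_ne.mpr (Ne.symm h11)
  have e12 : (predicate == "correlates with") = false := beq_eq_false_iff_ne.mpr h12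
  have f12 : ("correlates with" == predicate) = false := beq_eq_false_iff_ne.mpr (Ne.symm h12)
  have e13 : (predicate == "relates to") = false := beq_eq_false_iff_ne.mpr h13
  have f13 : ("relates to" == predicate) = false := beq_eq_false_iff_ne.mpr (Ne.symm h13)
  have e14 : (predicate == "degrades") = false := beq_eq_false_iff_ne.mpr h14
  have f14 : ("degrades" == predicate) = false := beq_eq_false_iff_ne.mpr (Ne.symm h14)
  have e15 : (predicate == "decomposes") = false := beq_eq_false_iff_ne.mpr h15
  have f15 : ("decomposes" == predicate) = false := beq_eq_false_iff_ne.mpr (Ne.symm h15)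
  have e16 : (predicate == "converts") = false := beq_eq_false_iff_ne.mpr h16
  have f16 : ("converts" == predicate) = false := beq_eq_false_iff_ne.mpr (Ne.symm h16)
  have e17 : (predicate == "transforms") = false := beq_eq_false_iff_ne.mpr h17
  have f17 : ("transforms" == predicate) = false := beq_eq_false_iff_ne.mpr (Ne.symm h17)
  have e18 : (predicate == "changes") = false := beq_eq_false_iff_ne.mpr h18
  have f18 : ("changes" == predicate) = false := beq_eq_false_iff_ne.mpr (Ne.symm h18)
  have e19 : (predicate == "utilizes") = false := beq_eq_false_iff_ne.mpr h19
  have f19 : ("utilizes" == predicate) = false := beq_eq_false_iff_ne.mpr (Ne.symm h19)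
  have e20 : (predicate == "uses") = false := beq_eq_false_iff_ne.mpr h20
  have f20 : ("uses" == predicate) = false := beq_eq_false_iff_ne.mpr (Ne.symm h20)
  have e21 : (predicate == "consumes") = false := beq_eq_false_iff_ne.mpr h21
  have f21 : ("consumes" == predicate) = false := beq_eq_false_iff_ne.mpr (Ne.symm h21)
  simp only [normalize_predicate_py, normalize_predicate_py_alt, pvFindStd, pvPredicateMap,
    pvCanonical, PySem.Dict.getD_eq_get?_getD, PySem.Dict.get?_mk_cons,
    List.contains_cons, List.contains_nil,
    e0, f0, e1, f1, e2, f2, e3, f3, e4, f4, e5, f5, e6, f6, e7, f7, e8, f8, e9, f9, e10, f10, e11, f11, e12, f12, e13, f13, e14, f14, e15, f15, e16, f16, e17, f17, e18, f18, e19, f19, e20, f20, e21, f21,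
    Bool.or_false, if_false, Bool.false_eq_true]
  rfl

-- ===== VERDICT (by name: the statement is the Claim_ definition above) =====
theorem normalize_predicate_py_spec : Claim_equal_normalize_predicate_py := by
  intro predicate _
  exact pv_eq predicate
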